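-- pv_equiv track=rewrite | github.com/OneCuriousLearner/MCPAgentRE | mcp_tools/data_precise_searcher.py | _get_priority_distribution
-- ===== SOURCE A (Python) =====
-- from typing import Dict, List, Any, Optional, Union
--
-- def _get_priority_distribution(items: List[Dict], item_type: str) -> Dict[str, int]:
--     """获取优先级分布"""
--     distribution = {}
--
--     for item in items:
--         priority = item.get('priority', '未知')
--         label = item.get('priority_label', priority)
--
--         key = f"{priority} ({label})" if label != priority else str(priority)
--         distribution[key] = distribution.get(key, 0) + 1
--
--     return distribution
-- ===== SOURCE B (Python) =====
-- def _get_priority_distribution(items, item_type):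
--     """获取优先级分布 (recursive partition: take the first key, count it by
--     filtering all its occurrences out, recurse on the remainder)"""
--     keys = []
--     for item in items:
--         priority = item.get('priority', '未知')
--         label = item.get('priority_label', priority)
--         keys.append(f"{priority} ({label})" if label != priority else str(priority))
--
--     def counts(ks):
--         if not ks:
--             return {}
--         k = ks[0]
--         rest = [x for x in ks if x != k]
--         result = {k: len(ks) - len(rest)}
--         result.update(counts(rest))
--         return result
--
--     return counts(keys)
-- ===== Notes on version B (the rewrite author's own statement) =====
-- stated objective: alternative
-- what changed: B replaces A's single hash-accumulation pass (dict counter incremented per item) with a map-to-keys phase followed by a recursive partition: take the first key, filter out all of its occurrences to count it, and recurse on the shrunken remainder; no dictionary lookup or increment is performed at all.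
import Mathlib
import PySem

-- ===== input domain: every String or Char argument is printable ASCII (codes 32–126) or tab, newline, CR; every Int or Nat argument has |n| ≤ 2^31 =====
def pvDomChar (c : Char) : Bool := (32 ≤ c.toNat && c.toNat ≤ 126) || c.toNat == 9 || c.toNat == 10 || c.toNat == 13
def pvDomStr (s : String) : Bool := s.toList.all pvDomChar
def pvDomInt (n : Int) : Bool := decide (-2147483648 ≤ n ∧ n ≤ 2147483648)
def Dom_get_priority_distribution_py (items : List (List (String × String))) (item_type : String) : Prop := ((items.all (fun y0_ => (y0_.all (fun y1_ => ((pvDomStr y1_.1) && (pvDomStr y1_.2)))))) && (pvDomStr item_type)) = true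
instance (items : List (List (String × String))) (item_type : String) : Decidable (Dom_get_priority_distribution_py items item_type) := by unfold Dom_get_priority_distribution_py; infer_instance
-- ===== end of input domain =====

-- B replaces A's single dict-counter pass by a map-to-keys phase followed by a recursive partition (count the first key by filtering it out, recurse); alternative decomposition, return value only.


-- shared key construction (identical lines in both Python sources):
-- priority = item.get('priority', '未知'); label = item.get('priority_label', priority);
-- key = f"{priority} ({label})" if label != priority else str(priority)
def pvMakeKey (item : List (String × String)) : String :=
  let priority := (PySem.Dict.mk item).getD "priority" "未知"
  let label := (PySem.Dict.mk item).getD "priority_label" priority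
  if label ≠ priority then priority ++ " (" ++ label ++ ")" else priority

-- ===== PORT A =====
def get_priority_distribution_py (items : List (List (String × String))) (item_type : String) : List (String × Int) :=
  (items.foldl (fun distribution item =>
      let key := pvMakeKey item
      distribution.insert key (distribution.getD key 0 + 1))
    PySem.Dict.empty).items

-- ===== PORT B =====
-- helper `counts` of Source B: recursive partition over the key list
def pvCounts : List String → List (String × Int)
  | [] => []
  | k :: t =>
    let rest := (k :: t).filter (fun x => x ≠ k)
    (k, ((k :: t).length : Int) - (rest.length : Int)) :: pvCounts rest
termination_by ks => ks.length
decreasing_by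
  simp only [List.filter_cons, decide_not, ne_eq]  -- head k is dropped by the filter
  simp only [decide_true, Bool.not_true]
  exact Nat.lt_succ_of_le (List.length_filter_le _ _)

def get_priority_distribution_py_alt (items : List (List (String × String))) (item_type : String) : List (String × Int) :=
  pvCounts (items.map pvMakeKey)

-- ===== PRECONDITION & SPEC =====
def Spec_get_priority_distribution_py (items : List (List (String × String))) (item_type : String) (out : List (String × Int)) : Prop := out = get_priority_distribution_py_alt items item_type
instance (items : List (List (String × String))) (item_type : String) (out : List (String × Int)) : Decidable (Spec_get_priority_distribution_py items item_type out) := by unfold Spec_get_priority_distribution_py; infer_instance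

-- ===== CLAIM (what is proved, stated in full; the proofs are below) =====
def Claim_equal_get_priority_distribution_py : Prop := ∀ (items : List (List (String × String))) (item_type : String), Dom_get_priority_distribution_py items item_type → Spec_get_priority_distribution_py items item_type (get_priority_distribution_py items item_type)

-- ===== LEMMAS AND PROOFS =====

theorem pv_foldl_add_cons (a : String) : ∀ (ls s : List String), a ∉ ls →
    List.foldl PySem.Set.add (a :: s) ls = a :: List.foldl PySem.Set.add s ls := by
  intro ls
  induction ls with
  | nil => intro s _; rfl
  | cons x t ih =>
    intro s hna
    have hx : x ≠ a := fun h => hna (h ▸ List.mem_cons_self)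
    have hat : a ∉ t := fun h => hna (List.mem_cons_of_mem _ h)
    by_cases hxs : x ∈ s
    · rw [List.foldl_cons, List.foldl_cons,
        PySem.Set.add_of_mem (List.mem_cons_of_mem _ hxs), PySem.Set.add_of_mem hxs]
      exact ih s hat
    · rw [List.foldl_cons, List.foldl_cons,
        PySem.Set.add_of_not_mem (by simp [hx, hxs]), PySem.Set.add_of_not_mem hxs]
      exact ih (s ++ [x]) hat

theorem pv_foldl_add_filter (a : String) : ∀ (ls s : List String), a ∈ s →
    List.foldl PySem.Set.add s ls = List.foldl PySem.Set.add s (ls.filter (fun x => x ≠ a)) := by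
  intro ls
  induction ls with
  | nil => intro s _; rfl
  | cons x t ih =>
    intro s has
    by_cases hxa : x = a
    · subst hxa
      simp only [List.filter_cons, ne_eq, not_true_eq_false, decide_false, List.foldl_cons]
      rw [PySem.Set.add_of_mem has]
      exact ih s has
    · simp only [List.filter_cons, ne_eq, hxa, not_false_eq_true, decide_true, List.foldl_cons]
      have : a ∈ PySem.Set.add s x := (PySem.Set.mem_add _ _ _).2 (Or.inl has)
      exact ih _ this

theorem pv_ofList_cons (a : String) (l : List String) :
    PySem.Set.ofList (a :: l) = a :: PySem.Set.ofList (l.filter (fun x => x ≠ a)) := by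
  have h1 : PySem.Set.ofList (a :: l) = List.foldl PySem.Set.add [a] l := rfl
  have h2 : a ∈ ([a] : List String) := List.mem_cons_self
  rw [h1, pv_foldl_add_filter a l [a] h2,
      pv_foldl_add_cons a (l.filter (fun x => x ≠ a)) []
        (by simp)]
  rfl

theorem pv_counts_eq : ∀ (ks : List String),
    pvCounts ks = (PySem.Set.ofList ks).map (fun k => (k, (ks.count k : Int))) := by
  intro ks
  induction hn : ks.length using Nat.strong_induction_on generalizing ks with
  | _ n ih =>
    match ks with
    | [] => simp [pvCounts]
    | k :: t =>
      have hfil : (k :: t).filter (fun x => x ≠ k) = t.filter (fun x => x ≠ k) := by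
        simp
      have hlen : (t.filter (fun x => x ≠ k)).length < n := by
        subst hn
        exact Nat.lt_succ_of_le (List.length_filter_le _ _)
      rw [pvCounts]
      simp only [hfil]
      rw [ih _ hlen _ rfl, pv_ofList_cons k t]
      simp only [List.map_cons, List.cons.injEq]
      refine ⟨?_, ?_⟩
      · -- head: length - filtered length = count
        have hlf : (t.filter (fun x => decide (x ≠ k))).length = t.countP (fun x => decide (x ≠ k)) :=
          List.countP_eq_length_filter.symm
        have hcc : t.countP (fun x => decide (x ≠ k)) + t.count k = t.length := by
          have h := List.length_eq_countP_add_countP (p := fun x => decide (x ≠ k)) (l := t)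
          simp only [decide_not, ne_eq, Bool.not_eq_true', decide_eq_false_iff_not, not_not] at h ⊢
          have h2 : t.countP (fun a => decide (a = k)) = t.count k := by
            rw [List.count_eq_countP]
            apply List.countP_congr; intro x _; simp
          omega
        simp only [Prod.mk.injEq, List.length_cons, List.count_cons_self, hlf]
        refine ⟨trivial, ?_⟩
        push_cast
        omega
      · -- tail: counts agree on elements of the filtered set
        apply List.map_congr_left
        intro x hx
        have hxm : x ∈ t.filter (fun x => decide (x ≠ k)) := (PySem.Set.mem_ofList _ _).1 hx
        have hxk : x ≠ k := by
          have := List.of_mem_filter hxm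
          simpa using this
        have h1 : (t.filter (fun y => decide (y ≠ k))).count x = t.count x :=
          List.count_filter (by simpa using hxk)
        have h2 : (k :: t).count x = t.count x := by
          rw [List.count_cons]
          simp [Ne.symm hxk]
        rw [h2, ← h1]

theorem pv_equal (items : List (List (String × String))) (item_type : String) :
    get_priority_distribution_py items item_type = get_priority_distribution_py_alt items item_type := by
  unfold get_priority_distribution_py get_priority_distribution_py_alt
  rw [← List.foldl_map (f := pvMakeKey)
        (g := fun (d : PySem.Dict String Int) (key : String) => d.insert key (d.getD key 0 + 1))
        (l := items) (init := PySem.Dict.empty),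
      PySem.Dict.foldl_insert_getD_add_one_eq_counter,
      PySem.Dict.items_counter, pv_counts_eq]

-- ===== VERDICT (by name: the statement is the Claim_ definition above) =====
theorem get_priority_distribution_py_spec : Claim_equal_get_priority_distribution_py := by
  intro items item_type _
  exact pv_equal items item_type
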